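-- pv_equiv track=rewrite | github.com/tienclay/UniScore | Question 3/encode-json.py | minify_json
-- ===== SOURCE A (Python) =====
-- def minify_json(text):
--     in_string = False
--     escape = False
--     result = []
--     for c in text:
--         if c == '"' and not escape:
--             in_string = not in_string
--             result.append(c)
--         elif in_string:
--             if c == '\\' and not escape:
--                 escape = True
--             else:
--                 escape = False
--             result.append(c)
--         else:
--             if c in " \n\t\r":
--                 continue
--             else:
--                 result.append(c)
--     return "".join(result)
-- ===== SOURCE B (Python) =====
-- def minify_json(text):
--     # Tokenizer: consume whole string literals in an inner scan; drop whitespace outside them.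
--     out = []
--     i = 0
--     n = len(text)
--     while i < n:
--         c = text[i]
--         if c == '"':
--             j = i + 1
--             while j < n:
--                 if text[j] == '\\':
--                     j += 2
--                 elif text[j] == '"':
--                     j += 1
--                     break
--                 else:
--                     j += 1
--             out.append(text[i:j])
--             i = j
--         elif c in " \n\t\r":
--             i += 1
--         else:
--             out.append(c)
--             i += 1
--     return "".join(out)
-- ===== Notes on version B (the rewrite author's own statement) =====
-- stated objective: alternative
-- what changed: Replaced the per-character in_string/escape flag machine with a two-level tokenizer: an outer index loop that, on a '"', hands off to an inner scan consuming the whole string literal (skipping backslash-escaped pairs) and appends it as one slice, and otherwise drops whitespace characters.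
import Mathlib
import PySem

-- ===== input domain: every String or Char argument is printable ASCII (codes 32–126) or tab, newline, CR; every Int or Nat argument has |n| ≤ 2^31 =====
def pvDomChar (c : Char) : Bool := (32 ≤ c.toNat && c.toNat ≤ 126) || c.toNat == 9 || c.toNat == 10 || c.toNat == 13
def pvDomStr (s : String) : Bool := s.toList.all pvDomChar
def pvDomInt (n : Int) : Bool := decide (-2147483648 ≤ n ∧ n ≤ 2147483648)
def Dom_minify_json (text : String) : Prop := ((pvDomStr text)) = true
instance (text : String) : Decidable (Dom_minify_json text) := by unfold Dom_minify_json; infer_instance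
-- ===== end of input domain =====

-- B rewrites A's per-character flag machine as a tokenizer that consumes whole string literals in an inner scan (alternative decomposition, same cost).

-- ===== PORT A =====
-- A's loop with state (in_string, escape), transcribed as structural recursion over the characters.
def minifyAGo : List Char → Bool → Bool → List Char
  | [], _, _ => []
  | c :: rest, inString, escape =>
    if c = '"' ∧ escape = false then
      c :: minifyAGo rest (!inString) escape
    else if inString = true then
      if c = '\\' ∧ escape = false then c :: minifyAGo rest inString true
      else c :: minifyAGo rest inString false
    else if c = ' ' ∨ c = '\n' ∨ c = '\t' ∨ c = '\r' then
      minifyAGo rest inString escape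
    else
      c :: minifyAGo rest inString escape

def minify_json (text : String) : String :=
  (minifyAGo text.toList false false)|> String.ofList

-- ===== PORT B =====
-- Inner scan of Source B: after an opening quote, consume up to and including the closing
-- quote, skipping a backslash together with the character after it; returns the
-- consumed chunk and the remainder.
def takeStr : List Char → List Char × List Char
  | [] => ([], [])
  | c :: rest =>
    if c = '\\' then
      match rest with
      | [] => ([c], [])
      | d :: rest' => let p := takeStr rest'; (c :: d :: p.1, p.2)
    else if c = '"' then ([c], rest)
    else let p := takeStr rest; (c :: p.1, p.2)

theorem takeStr_len_fuel : ∀ (n : Nat) (l : List Char), l.length ≤ n →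
    (takeStr l).2.length ≤ l.length := by
  intro n
  induction n with
  | zero =>
    intro l hl
    have h0 : l = [] := List.eq_nil_of_length_eq_zero (Nat.le_zero.mp hl)
    subst h0; simp [takeStr]
  | succ n ih =>
    intro l hl
    cases l with
    | nil => simp [takeStr]
    | cons c rest =>
      by_cases hb : c = '\\'
      · cases rest with
        | nil => simp [takeStr.eq_def, hb]
        | cons d rest' =>
          have h' : rest'.length ≤ n := by simp at hl; omega
          have := ih rest' h'
          rw [takeStr.eq_def]; simp [hb]; omega
      · by_cases hq : c = '"'
        · simp [takeStr.eq_def, hq]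
        · have h' : rest.length ≤ n := by simp at hl; omega
          have := ih rest h'
          rw [takeStr.eq_def]; simp [hb, hq]; omega

theorem takeStr_len (l : List Char) : (takeStr l).2.length ≤ l.length :=
  takeStr_len_fuel l.length l le_rfl

-- Outer loop of Source B.
def minifyB : List Char → List Char
  | [] => []
  | c :: rest =>
    if c = '"' then
      let p := takeStr rest
      c :: (p.1 ++ minifyB p.2)
    else if c = ' ' ∨ c = '\n' ∨ c = '\t' ∨ c = '\r' then
      minifyB rest
    else
      c :: minifyB rest
termination_by l => l.length
decreasing_by
  · exact Nat.lt_succ_of_le (takeStr_len rest)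
  · simp
  · simp

def minify_json_alt (text : String) : String :=
  (minifyB text.toList)|> String.ofList

-- ===== PRECONDITION & SPEC =====
def Spec_minify_json (text : String) (out : String) : Prop := out = minify_json_alt text
instance (text : String) (out : String) : Decidable (Spec_minify_json text out) := by unfold Spec_minify_json; infer_instance

-- ===== CLAIM (what is proved, stated in full; the proofs are below) =====
def Claim_equal_minify_json : Prop := ∀ (text : String), Dom_minify_json text → Spec_minify_json text (minify_json text)

-- ===== LEMMAS AND PROOFS =====

-- Core invariant, by strong induction on the length: outside a string the flag machine
-- agrees with the tokenizer, and inside a string (escape clear) it produces exactly the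
-- chunk takeStr consumes followed by the tokenizer's output on the remainder.
theorem minify_main : ∀ (n : Nat) (l : List Char), l.length ≤ n →
    (minifyAGo l false false = minifyB l ∧
     minifyAGo l true false = (takeStr l).1 ++ minifyB (takeStr l).2) := by
  intro n
  induction n with
  | zero =>
    intro l hl
    have : l = [] := List.eq_nil_of_length_eq_zero (Nat.le_zero.mp hl)
    subst this
    simp [minifyAGo, minifyB, takeStr]
  | succ n ih =>
    intro l hl
    cases l with
    | nil => simp [minifyAGo, minifyB, takeStr]
    | cons c rest =>
      have hr : rest.length ≤ n := by simpa using hl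
      constructor
      · -- outside a string
        by_cases hq : c = '"'
        · simp [minifyAGo, minifyB, hq, (ih rest hr).2]
        · by_cases hw : c = ' ' ∨ c = '\n' ∨ c = '\t' ∨ c = '\r'
          · simp [minifyAGo, minifyB, hq, hw, (ih rest hr).1]
          · simp [minifyAGo, minifyB, hq, hw, (ih rest hr).1]
      · -- inside a string, escape clear
        by_cases hb : c = '\\'
        · have hq : c ≠ '"' := by subst hb; decide
          cases rest with
          | nil => simp [minifyAGo, minifyB, takeStr.eq_def, hb]
          | cons d rest' =>
            have hr' : rest'.length ≤ n := by simp at hl; omega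
            rw [takeStr.eq_def]; simp [minifyAGo, hb, (ih rest' hr').2]
        · by_cases hq : c = '"'
          · simp [minifyAGo, takeStr.eq_def, hq, (ih rest hr).1]
          · rw [takeStr.eq_def]; simp [minifyAGo, hq, hb, (ih rest hr).2]

-- ===== VERDICT (by name: the statement is the Claim_ definition above) =====
theorem minify_json_spec : Claim_equal_minify_json := by
  intro text _
  unfold Spec_minify_json minify_json minify_json_alt
  rw [(minify_main text.toList.length text.toList le_rfl).1]
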